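-- pv_equiv track=rewrite | github.com/kylelisk/AoC2017 | Day2/D2P1.py | rowDifference
-- ===== SOURCE A (Python) =====
-- def rowDifference(row):
--     vals = row.split()
--
--     # Set high and low vals to the first value in the list
--     lowVal = int(vals[0])
--     highVal = int(vals[0])
--
--     for val in vals:
--         if int(val) < lowVal:
--             lowVal = int(val)
--         elif int(val) > highVal:
--             highVal = int(val)
--
--     return (highVal - lowVal)
-- ===== SOURCE B (Python) =====
-- def rowDifference(row):
--     s = sorted(int(x) for x in row.split())
--     return s[-1] - s[0]
-- ===== Notes on version B (the rewrite author's own statement) =====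
-- stated objective: simpler
-- what changed: Replaces the running-min/max scan with explicit first-element initialisation by parsing all tokens once and sorting, then reading the two extremes as s[-1] - s[0].
import Mathlib
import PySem

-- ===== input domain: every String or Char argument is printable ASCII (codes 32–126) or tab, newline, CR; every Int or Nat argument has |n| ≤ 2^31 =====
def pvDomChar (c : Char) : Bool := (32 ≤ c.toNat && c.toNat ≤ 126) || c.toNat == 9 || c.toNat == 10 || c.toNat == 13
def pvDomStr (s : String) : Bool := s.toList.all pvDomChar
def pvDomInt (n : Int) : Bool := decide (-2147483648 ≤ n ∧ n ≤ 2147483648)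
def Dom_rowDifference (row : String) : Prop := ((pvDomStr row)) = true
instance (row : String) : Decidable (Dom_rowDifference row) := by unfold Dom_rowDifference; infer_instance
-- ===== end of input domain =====

-- B replaces A's running-min/max scan (seeded from the first token) by parse-all-then-sort
-- and reading the extremes s[-1] - s[0]; objective: simpler.

-- ===== PORT A =====
-- int(val); Pre_ guarantees isSome, so the default is never used inside Pre_
def pvToInt (s : String) : Int := (PySem.Int.ofStr? s).getD 0

def rowDifference (row : String) : Int :=
  let vals := PySem.Str.split₀ row
  match vals with
  | [] => 0  -- vals[0] raises IndexError in Python; excluded by Pre_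
  | v :: _ =>
    let first := pvToInt v
    let p := vals.foldl
      (fun p val =>
        if pvToInt val < p.1 then (pvToInt val, p.2)
        else if pvToInt val > p.2 then (p.1, pvToInt val)
        else p)
      (first, first)
    p.2 - p.1

-- ===== PORT B =====
def rowDifference_alt (row : String) : Int :=
  let s := PySem.List.sorted ((PySem.Str.split₀ row).map pvToInt) (fun x => x) false
  PySem.List.pyGetD s (-1) 0 - PySem.List.pyGetD s 0 0

-- ===== PRECONDITION & SPEC =====
-- Pre_ excludes exactly the inputs where A raises: an empty/whitespace-only row
-- (IndexError on vals[0]) and rows with a token int() rejects (ValueError).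
def Pre_rowDifference (row : String) : Prop :=
  PySem.Str.split₀ row ≠ [] ∧ ∀ v ∈ PySem.Str.split₀ row, (PySem.Int.ofStr? v).isSome
instance (row : String) : Decidable (Pre_rowDifference row) := by unfold Pre_rowDifference; infer_instance
def pvWitness_rowDifference : String := "3 1 2"

def Spec_rowDifference (row : String) (out : Int) : Prop := out = rowDifference_alt row
instance (row : String) (out : Int) : Decidable (Spec_rowDifference row out) := by unfold Spec_rowDifference; infer_instance

-- ===== CLAIM (what is proved, stated in full; the proofs are below) =====
def Claim_equal_rowDifference : Prop := ∀ (row : String), Dom_rowDifference row → Pre_rowDifference row → Spec_rowDifference row (rowDifference row)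

-- ===== LEMMAS AND PROOFS =====

-- A's loop body equals componentwise min/max when the accumulator is ordered
theorem pv_scan_minmax (ns : List Int) :
    ∀ lo hi : Int, lo ≤ hi →
      ns.foldl (fun p x => if x < p.1 then (x, p.2) else if x > p.2 then (p.1, x) else p) (lo, hi)
        = (ns.foldl min lo, ns.foldl max hi) := by
  induction ns with
  | nil => intro lo hi _; simp
  | cons x ns ih =>
    intro lo hi h
    simp only [List.foldl_cons]
    have hstep : (if x < (lo, hi).1 then (x, (lo, hi).2)
        else if x > (lo, hi).2 then ((lo, hi).1, x) else (lo, hi)) = (min lo x, max hi x) := by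
      by_cases h1 : x < lo
      · simp [h1, min_eq_right h1.le, max_eq_left (h1.le.trans h)]
      · by_cases h2 : x > hi
        · simp [h1, h2, min_eq_left (h.trans h2.le), max_eq_right h2.le]
        · simp [h1, h2, min_eq_left (le_of_not_gt h1), max_eq_left (le_of_not_gt h2)]
    rw [hstep]
    exact ih _ _ (le_trans (min_le_left lo x) (h.trans (le_max_left hi x)))

theorem pv_foldl_min_init (ns : List Int) : ∀ a : Int, ns.foldl min a ≤ a := by
  induction ns with
  | nil => intro a; simp
  | cons x ns ih =>
    intro a
    rw [List.foldl_cons]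
    exact le_trans (ih (min a x)) (min_le_left _ _)

theorem pv_foldl_max_init (ns : List Int) : ∀ a : Int, a ≤ ns.foldl max a := by
  induction ns with
  | nil => intro a; simp
  | cons x ns ih =>
    intro a
    rw [List.foldl_cons]
    exact le_trans (le_max_left _ _) (ih (max a x))

theorem pv_foldl_min_mem (ns : List Int) : ∀ a : Int, ns.foldl min a ∈ a :: ns := by
  induction ns with
  | nil => intro a; simp
  | cons x ns ih =>
    intro a
    rw [List.foldl_cons]
    rcases List.mem_cons.mp (ih (min a x)) with h | h
    · rw [h]
      rcases min_choice a x with he | he <;> rw [he] <;> simp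
    · exact List.mem_cons_of_mem _ (List.mem_cons_of_mem _ h)

theorem pv_foldl_min_le (ns : List Int) : ∀ a x : Int, x ∈ a :: ns → ns.foldl min a ≤ x := by
  induction ns with
  | nil => intro a x hx; simp at hx; simp [hx]
  | cons y ns ih =>
    intro a x hx
    rw [List.foldl_cons]
    rcases List.mem_cons.mp hx with rfl | hx'
    · exact le_trans (pv_foldl_min_init ns (min x y)) (min_le_left _ _)
    · rcases List.mem_cons.mp hx' with rfl | hx''
      · exact le_trans (pv_foldl_min_init ns (min a x)) (min_le_right _ _)
      · exact ih (min a y) x (List.mem_cons_of_mem _ hx'')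

theorem pv_foldl_max_mem (ns : List Int) : ∀ a : Int, ns.foldl max a ∈ a :: ns := by
  induction ns with
  | nil => intro a; simp
  | cons x ns ih =>
    intro a
    rw [List.foldl_cons]
    rcases List.mem_cons.mp (ih (max a x)) with h | h
    · rw [h]
      rcases max_choice a x with he | he <;> rw [he] <;> simp
    · exact List.mem_cons_of_mem _ (List.mem_cons_of_mem _ h)

theorem pv_foldl_max_ge (ns : List Int) : ∀ a x : Int, x ∈ a :: ns → x ≤ ns.foldl max a := by
  induction ns with
  | nil => intro a x hx; simp at hx; simp [hx]
  | cons y ns ih =>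
    intro a x hx
    rw [List.foldl_cons]
    rcases List.mem_cons.mp hx with rfl | hx'
    · exact le_trans (le_max_left _ _) (pv_foldl_max_init ns (max x y))
    · rcases List.mem_cons.mp hx' with rfl | hx''
      · exact le_trans (le_max_right _ _) (pv_foldl_max_init ns (max a x))
      · exact ih (max a y) x (List.mem_cons_of_mem _ hx'')

theorem pv_head_le (s : List Int) (hs : s.Pairwise (· ≤ ·)) :
    ∀ x ∈ s, s.getD 0 0 ≤ x := by
  cases s with
  | nil => intro x hx; simp at hx
  | cons h t =>
    intro x hx
    rcases List.mem_cons.mp hx with rfl | hx'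
    · simp
    · exact (List.pairwise_cons.mp hs).1 x hx'

theorem pv_le_getLast (s : List Int) (hs : s.Pairwise (· ≤ ·)) (hne : s ≠ []) :
    ∀ x ∈ s, x ≤ s.getLast hne := by
  induction s with
  | nil => intro x hx; simp at hx
  | cons h t ih =>
    intro x hx
    cases t with
    | nil => simp at hx; simp [hx]
    | cons y t' =>
      rcases List.mem_cons.mp hx with rfl | hx'
      · rw [List.getLast_cons (by simp)]
        exact le_trans ((List.pairwise_cons.mp hs).1 y (by simp))
          (ih (List.pairwise_cons.mp hs).2 (by simp) y (by simp))
      · rw [List.getLast_cons (by simp)]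
        exact ih (List.pairwise_cons.mp hs).2 (by simp) x hx'

theorem rowDifference_eq (row : String) (hpre : Pre_rowDifference row) :
    rowDifference row = rowDifference_alt row := by
  obtain ⟨hne, _⟩ := hpre
  unfold rowDifference rowDifference_alt
  cases hv : PySem.Str.split₀ row with
  | nil => exact absurd hv hne
  | cons v vs =>
    simp only
    set n := pvToInt v with hn
    set ns := vs.map pvToInt with hns
    have hfold : (v :: vs).foldl
        (fun p val => if pvToInt val < p.1 then (pvToInt val, p.2)
          else if pvToInt val > p.2 then (p.1, pvToInt val) else p) (n, n)
        = (ns.foldl min n, ns.foldl max n) := by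
      rw [List.foldl_cons]
      have : (if pvToInt v < (n, n).1 then (pvToInt v, (n, n).2)
          else if pvToInt v > (n, n).2 then ((n, n).1, pvToInt v) else (n, n)) = (n, n) := by
        simp [← hn]
      rw [this]
      have := pv_scan_minmax (ns := ns) n n le_rfl
      calc vs.foldl (fun p val => if pvToInt val < p.1 then (pvToInt val, p.2)
            else if pvToInt val > p.2 then (p.1, pvToInt val) else p) (n, n)
          = ns.foldl (fun p x => if x < p.1 then (x, p.2)
            else if x > p.2 then (p.1, x) else p) (n, n) := by
            rw [hns, List.foldl_map]
        _ = (ns.foldl min n, ns.foldl max n) := this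
    rw [hfold]
    set s := PySem.List.sorted ((v :: vs).map pvToInt) (fun x => x) false with hsdef
    have hperm : s.Perm (n :: ns) := by
      simpa [hns, hn] using PySem.List.sorted_perm ((v :: vs).map pvToInt) (fun x => x) false
    have hsne : s ≠ [] := by
      intro h; have := hperm.length_eq; simp [h] at this
    have hpw : s.Pairwise (· ≤ ·) := by
      simpa using PySem.List.sorted_pairwise ((v :: vs).map pvToInt) (fun x => x)
    have hmem : ∀ x, x ∈ s ↔ x ∈ n :: ns := fun x => hperm.mem_iff
    -- min equality
    have hmin : s.getD 0 0 = ns.foldl min n := by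
      apply le_antisymm
      · exact pv_head_le s hpw _ ((hmem _).mpr (pv_foldl_min_mem ns n))
      · have hhd : s.getD 0 0 ∈ s := by
          obtain ⟨a, t, he⟩ := List.exists_cons_of_ne_nil hsne
          rw [he]; simp
        exact pv_foldl_min_le ns n _ ((hmem _).mp hhd)
    have hmax : s.getLast hsne = ns.foldl max n := by
      apply le_antisymm
      · exact pv_foldl_max_ge ns n _ ((hmem _).mp (List.getLast_mem hsne))
      · exact pv_le_getLast s hpw hsne _ ((hmem _).mpr (pv_foldl_max_mem ns n))
    rw [PySem.List.pyGetD_neg_one s 0 hsne, PySem.List.pyGetD_zero, hmin, hmax]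

-- ===== VERDICT (by name: the statement is the Claim_ definition above) =====
theorem rowDifference_spec : Claim_equal_rowDifference := by
  intro row _ hpre
  exact rowDifference_eq row hpre
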